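-- pv_equiv track=rewrite | github.com/vabsalack/COMPETITIVE-CODING | CSE/CSE330/Dynamic_Programming/3.2_Wet Shark and Two Subsequences.py | twoSubsequences
-- ===== SOURCE A (Python) =====
-- mod = 10**9+7
--
-- def twoSubsequences(x, r, s):
--     # Write your code here
--     if r<s or (r+s)%2==1 or r==0:
--         return 0
--     h,l = (r+s)//2, (r-s)//2
--     m = len(x)
--     dp = [[0 for i in range(m+1)] for j in range(h+1)]
--     dp[0][0] = 1
--     if x[0]<=h:
--         dp[x[0]][1] = 1
--     for i in range(1, m):
--         for j in range(h,0,-1):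
--             for k in range(1,m+1):
--                 if j>=x[i]:
--                     dp[j][k] = (dp[j][k]+dp[j-x[i]][k-1]) % mod
--     res = 0
--     for k in range(1,m+1):
--         res  = (res+dp[h][k]*dp[l][k]) % mod
--     return res
-- ===== SOURCE B (Python) =====
-- mod = 10**9+7
--
-- def twoSubsequences(x, r, s):
--     if r < s or (r + s) % 2 == 1 or r == 0:
--         return 0
--     h, l = (r + s) // 2, (r - s) // 2
--     memo = {}
--
--     def f(i, j, k):
--         # number (mod mod) of size-k subsets of x[i:] summing to j
--         if j < 0 or k < 0:
--             return 0
--         if i == len(x):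
--             return 1 if (j == 0 and k == 0) else 0
--         key = (i, j, k)
--         if key not in memo:
--             memo[key] = (f(i + 1, j, k) + f(i + 1, j - x[i], k - 1)) % mod
--         return memo[key]
--
--     res = 0
--     for k in range(1, len(x) + 1):
--         res = (res + f(0, h, k) * f(0, l, k)) % mod
--     return res
-- ===== Notes on version B (the rewrite author's own statement) =====
-- stated objective: alternative
-- what changed: Replaces A's bottom-up dense (h+1)x(m+1) table with its in-place triple nested loop by top-down memoized recursion f(i,j,k) over the element index (include/exclude x[i]), pairing f(0,h,k) with f(0,l,k).
-- outside the precondition, e.g. on twoSubsequences([1, 0], 1, 1): A returns 0, B returns 1; on twoSubsequences([-1], 2, 0): A returns 1, B returns 0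
import Mathlib
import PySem

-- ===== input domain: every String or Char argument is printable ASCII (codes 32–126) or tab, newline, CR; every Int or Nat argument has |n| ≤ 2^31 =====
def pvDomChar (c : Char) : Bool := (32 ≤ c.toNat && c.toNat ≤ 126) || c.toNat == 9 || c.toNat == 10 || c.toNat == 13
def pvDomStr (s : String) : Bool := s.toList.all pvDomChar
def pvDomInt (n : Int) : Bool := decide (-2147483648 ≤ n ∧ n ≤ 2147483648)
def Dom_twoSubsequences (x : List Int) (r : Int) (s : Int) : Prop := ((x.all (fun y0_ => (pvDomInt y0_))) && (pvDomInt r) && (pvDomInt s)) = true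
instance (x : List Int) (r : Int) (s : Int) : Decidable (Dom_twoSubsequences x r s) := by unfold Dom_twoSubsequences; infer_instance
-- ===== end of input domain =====

-- B replaces A's bottom-up dense (h+1)×(m+1) table and in-place triple loop by top-down
-- memoized recursion over the element index (objective: alternative decomposition).

-- ===== PORT A =====
-- module constant 'mod'
def pvMod : Int := 1000000007

-- dp[j][k] read / dp[j][k] = v write (Python list indexing; in range under Pre_)
def pvGet2 (dp : List (List Int)) (j k : Int) : Int :=
  PySem.List.pyGetD (PySem.List.pyGetD dp j []) k 0

def pvSet2 (dp : List (List Int)) (j k v : Int) : List (List Int) :=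
  PySem.List.pySetD dp j (PySem.List.pySetD (PySem.List.pyGetD dp j []) k v)

def twoSubsequences (x : List Int) (r : Int) (s : Int) : Int :=
  if r < s ∨ PySem.Int.mod (r + s) 2 = 1 ∨ r = 0 then 0
  else
    let h := PySem.Int.floordiv (r + s) 2
    let l := PySem.Int.floordiv (r - s) 2
    let m : Int := x.length
    let dp : List (List Int) :=
      (PySem.List.pyRange 0 (h + 1) 1).map (fun _ =>
        (PySem.List.pyRange 0 (m + 1) 1).map (fun _ => (0 : Int)))
    let dp := pvSet2 dp 0 0 1
    -- x[0] raises IndexError on empty x (excluded by Pre_)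
    let x0 := PySem.List.pyGetD x 0 0
    let dp := if x0 ≤ h then pvSet2 dp x0 1 1 else dp
    let dp := (PySem.List.pyRange 1 m 1).foldl (fun dp i =>
      (PySem.List.pyRange h 0 (-1)).foldl (fun dp j =>
        (PySem.List.pyRange 1 (m + 1) 1).foldl (fun dp k =>
          let xi := PySem.List.pyGetD x i 0
          if j ≥ xi then
            pvSet2 dp j k (PySem.Int.mod (pvGet2 dp j k + pvGet2 dp (j - xi) (k - 1)) pvMod)
          else dp) dp) dp) dp
    (PySem.List.pyRange 1 (m + 1) 1).foldl (fun res k =>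
      PySem.Int.mod (res + pvGet2 dp h k * pvGet2 dp l k) pvMod) 0

-- ===== PORT B =====
-- Source B's helper f(i, j, k) recursing on the suffix x[i:]; the memo dict of Source B is a pure
-- cache (it stores exactly the value this recursion returns for each key), so the port is
-- the recursion itself, guards in Source B's order.
def bF : List Int → Int → Int → Int
  | [], j, k => if j < 0 ∨ k < 0 then 0 else if j = 0 ∧ k = 0 then 1 else 0
  | v :: t, j, k => if j < 0 ∨ k < 0 then 0
      else PySem.Int.mod (bF t j k + bF t (j - v) (k - 1)) pvMod

def twoSubsequences_alt (x : List Int) (r : Int) (s : Int) : Int :=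
  if r < s ∨ PySem.Int.mod (r + s) 2 = 1 ∨ r = 0 then 0
  else
    let h := PySem.Int.floordiv (r + s) 2
    let l := PySem.Int.floordiv (r - s) 2
    (PySem.List.pyRange 1 ((x.length : Int) + 1) 1).foldl (fun res k =>
      PySem.Int.mod (res + bF x h k * bF x l k) pvMod) 0

-- ===== PRECONDITION & SPEC =====
-- Pre_ restricts the guard-passing case to the problem's natural domain — non-empty x of
-- positive elements and s ≥ 0 — outside which A raises IndexError (empty x, s < 0, a negative
-- element past index 0) or returns accidental values (negative-index wraparound for a negative
-- first element; zero elements whose zero-sum contributions A's j ≥ 1 loop never records).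
def Pre_twoSubsequences (x : List Int) (r : Int) (s : Int) : Prop :=
  (r < s ∨ PySem.Int.mod (r + s) 2 = 1 ∨ r = 0) ∨ (x ≠ [] ∧ 0 ≤ s ∧ ∀ e ∈ x, 1 ≤ e)
instance (x : List Int) (r : Int) (s : Int) : Decidable (Pre_twoSubsequences x r s) := by
  unfold Pre_twoSubsequences; infer_instance

def pvWitness_twoSubsequences : List Int × Int × Int := ([1, 2], 3, 1)

def Spec_twoSubsequences (x : List Int) (r : Int) (s : Int) (out : Int) : Prop := out = twoSubsequences_alt x r s
instance (x : List Int) (r : Int) (s : Int) (out : Int) : Decidable (Spec_twoSubsequences x r s out) := by unfold Spec_twoSubsequences; infer_instance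

-- ===== CLAIM (what is proved, stated in full; the proofs are below) =====
def Claim_equal_twoSubsequences : Prop := ∀ (x : List Int) (r : Int) (s : Int), Dom_twoSubsequences x r s → Pre_twoSubsequences x r s → Spec_twoSubsequences x r s (twoSubsequences x r s)


-- ===== LEMMAS AND PROOFS =====

-- count (mod pvMod) of size-k index-subsets of l summing to j
def cntF : List Int → Int → Int → Int
  | [], j, k => if j = 0 ∧ k = 0 then 1 else 0
  | v :: t, j, k => (cntF t j k + cntF t (j - v) (k - 1)) % pvMod

theorem pvMod_pos : (0 : Int) < pvMod := by norm_num [pvMod]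

theorem cntF_bounds (l : List Int) (j k : Int) : 0 ≤ cntF l j k ∧ cntF l j k < pvMod := by
  induction l generalizing j k with
  | nil => constructor <;> simp only [cntF] <;> split <;> norm_num [pvMod]
  | cons v t ih =>
    exact ⟨Int.emod_nonneg _ (by norm_num [pvMod]), Int.emod_lt_of_pos _ pvMod_pos⟩

theorem cntF_emod (l : List Int) (j k : Int) : cntF l j k % pvMod = cntF l j k :=
  Int.emod_eq_of_lt (cntF_bounds l j k).1 (cntF_bounds l j k).2

theorem cntF_jneg (l : List Int) (hl : ∀ e ∈ l, 1 ≤ e) (j k : Int) (hj : j < 0) :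
    cntF l j k = 0 := by
  induction l generalizing j k with
  | nil => simp only [cntF]; split; omega; rfl
  | cons v t ih =>
    have hv : 1 ≤ v := hl v (by simp)
    have ht : ∀ e ∈ t, 1 ≤ e := fun e he => hl e (by simp [he])
    simp only [cntF, ih ht j k hj, ih ht (j - v) (k - 1) (by omega)]
    rfl

theorem cntF_kneg (l : List Int) (j k : Int) (hk : k < 0) : cntF l j k = 0 := by
  induction l generalizing j k with
  | nil => simp only [cntF]; split; omega; rfl
  | cons v t ih =>
    simp only [cntF, ih j k hk, ih (j - v) (k - 1) (by omega)]
    rfl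

theorem cntF_kzero (l : List Int) (j : Int) : cntF l j 0 = if j = 0 then 1 else 0 := by
  induction l generalizing j with
  | nil => simp [cntF]
  | cons v t ih =>
    have h2 : cntF t (j - v) (0 - 1) = 0 := cntF_kneg t _ _ (by omega)
    simp only [cntF, ih j, h2]
    split <;> norm_num [pvMod]

theorem cntF_jzero (l : List Int) (hl : ∀ e ∈ l, 1 ≤ e) (k : Int) (hk : 1 ≤ k) :
    cntF l 0 k = 0 := by
  induction l generalizing k with
  | nil => simp only [cntF]; split; omega; rfl
  | cons v t ih =>
    have hv : 1 ≤ v := hl v (by simp)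
    have ht : ∀ e ∈ t, 1 ≤ e := fun e he => hl e (by simp [he])
    have h2 : cntF t (0 - v) (k - 1) = 0 := cntF_jneg t ht _ _ (by omega)
    by_cases hk1 : 1 ≤ k - 1
    · simp only [cntF, ih ht k hk, h2]; rfl
    · have : k = 1 := by omega
      subst this
      simp only [cntF, ih ht 1 hk, h2]; rfl

theorem emod_add_swap (a b c d M : Int) :
    ((a + b) % M + (c + d) % M) % M = ((a + c) % M + (b + d) % M) % M := by
  conv_lhs => rw [← Int.add_emod]
  conv_rhs => rw [← Int.add_emod]
  have h : a + b + (c + d) = a + c + (b + d) := by ring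
  rw [h]

theorem cntF_append (p : List Int) (v j k : Int) :
    cntF (p ++ [v]) j k = (cntF p j k + cntF p (j - v) (k - 1)) % pvMod := by
  induction p generalizing j k with
  | nil => rfl
  | cons w t ih =>
    show (cntF (t ++ [v]) j k + cntF (t ++ [v]) (j - w) (k - 1)) % pvMod = _
    rw [ih j k, ih (j - w) (k - 1)]
    show _ = ((cntF t j k + cntF t (j - w) (k - 1)) % pvMod +
      (cntF t (j - v) (k - 1) + cntF t (j - v - w) (k - 1 - 1)) % pvMod) % pvMod
    rw [emod_add_swap]
    have e : j - w - v = j - v - w := by ring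
    rw [e]


-- ---------- A-side table machinery ----------

theorem pyGetD_nonneg {α : Type} (xs : List α) (i : Int) (d : α) (h : 0 ≤ i) :
    PySem.List.pyGetD xs i d = xs.getD i.toNat d := by
  conv_lhs => rw [← Int.toNat_of_nonneg h]
  exact PySem.List.pyGetD_natCast xs i.toNat d

theorem getD_set_self2 {α : Type} (dp : List α) (a : Nat) (r d : α) (ha : a < dp.length) :
    ((dp.set a r).getD a d) = r := by
  simp [List.getD_eq_getElem?_getD, ha]

theorem getD_set_ne2 {α : Type} (dp : List α) (a a' : Nat) (r d : α) (h : a' ≠ a) :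
    ((dp.set a r).getD a' d) = dp.getD a' d := by
  simp [List.getD_eq_getElem?_getD, List.getElem?_set_ne (Ne.symm h)]

def Shp (dp : List (List Int)) (H M : Int) : Prop :=
  dp.length = (H + 1).toNat ∧ ∀ row ∈ dp, row.length = (M + 1).toNat

theorem pvGet2_eq (dp : List (List Int)) (j k : Int) (hj : 0 ≤ j) (hk : 0 ≤ k) :
    pvGet2 dp j k = (dp.getD j.toNat []).getD k.toNat 0 := by
  unfold pvGet2
  rw [pyGetD_nonneg dp j [] hj, pyGetD_nonneg _ k 0 hk]

theorem pvSet2_eq (dp : List (List Int)) (j k v : Int) (hj : 0 ≤ j) (hk : 0 ≤ k) :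
    pvSet2 dp j k v = dp.set j.toNat ((dp.getD j.toNat []).set k.toNat v) := by
  unfold pvSet2
  rw [PySem.List.pySetD_of_nonneg dp _ hj, pyGetD_nonneg dp j [] hj,
      PySem.List.pySetD_of_nonneg _ _ hk]

theorem shp_set2 (dp : List (List Int)) (H M j k v : Int) (hs : Shp dp H M)
    (hj : 0 ≤ j ∧ j ≤ H) (hk : 0 ≤ k ∧ k ≤ M) : Shp (pvSet2 dp j k v) H M := by
  obtain ⟨hlen, hrows⟩ := hs
  rw [pvSet2_eq dp j k v hj.1 hk.1]
  have hjl : j.toNat < dp.length := by rw [hlen]; omega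
  constructor
  · simpa using hlen
  · intro row hrow
    rcases List.mem_or_eq_of_mem_set hrow with h | h
    · exact hrows row h
    · subst h
      rw [List.length_set]
      have : dp.getD j.toNat [] = dp[j.toNat] := List.getD_eq_getElem dp [] hjl
      rw [this]
      exact hrows _ (List.getElem_mem hjl)

theorem pvGet2_pvSet2 (dp : List (List Int)) (H M j k v j' k' : Int) (hs : Shp dp H M)
    (hj : 0 ≤ j ∧ j ≤ H) (hk : 0 ≤ k ∧ k ≤ M)
    (hj' : 0 ≤ j' ∧ j' ≤ H) (hk' : 0 ≤ k' ∧ k' ≤ M) :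
    pvGet2 (pvSet2 dp j k v) j' k' = if j' = j ∧ k' = k then v else pvGet2 dp j' k' := by
  obtain ⟨hlen, hrows⟩ := hs
  have hjl : j.toNat < dp.length := by rw [hlen]; omega
  rw [pvSet2_eq dp j k v hj.1 hk.1, pvGet2_eq _ j' k' hj'.1 hk'.1,
      pvGet2_eq dp j' k' hj'.1 hk'.1]
  by_cases hjj : j' = j
  · rw [hjj]
    rw [getD_set_self2 dp j.toNat _ [] hjl]
    have hkl : k.toNat < (dp.getD j.toNat []).length := by
      have : dp.getD j.toNat [] = dp[j.toNat] := List.getD_eq_getElem dp [] hjl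
      rw [this, hrows _ (List.getElem_mem hjl)]; omega
    by_cases hkk : k' = k
    · rw [hkk]
      rw [getD_set_self2 _ k.toNat _ 0 hkl]
      simp
    · rw [getD_set_ne2 _ k.toNat k'.toNat _ 0 (by omega)]
      simp [hkk]
  · rw [getD_set_ne2 dp j.toNat j'.toNat _ [] (by omega)]
    simp [hjj]

theorem init_eq_repl (h m : Int) :
    ((PySem.List.pyRange 0 (h + 1) 1).map (fun _ =>
      (PySem.List.pyRange 0 (m + 1) 1).map (fun _ => (0 : Int)))) =
    List.replicate (h + 1).toNat (List.replicate (m + 1).toNat 0) := by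
  simp [List.map_const', PySem.List.length_pyRange_one]

theorem shp_init (h m : Int) :
    Shp ((PySem.List.pyRange 0 (h + 1) 1).map (fun _ =>
      (PySem.List.pyRange 0 (m + 1) 1).map (fun _ => (0 : Int)))) h m := by
  rw [init_eq_repl]
  constructor
  · simp
  · intro row hrow
    rw [List.eq_of_mem_replicate hrow]
    simp

theorem getD_repl_zero (H M a b : Nat) :
    ((List.replicate H (List.replicate M (0 : Int))).getD a []).getD b 0 = 0 := by
  rcases Nat.lt_or_ge a H with h | h
  · rw [List.getD_eq_getElem _ _ (show a < (List.replicate H (List.replicate M (0:Int))).length by simpa using h),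
        List.getElem_replicate]
    rcases Nat.lt_or_ge b M with h2 | h2
    · rw [List.getD_eq_getElem _ _ (show b < (List.replicate M (0:Int)).length by simpa using h2),
          List.getElem_replicate]
    · exact List.getD_eq_default _ _ (by simpa using h2)
  · rw [show (List.replicate H (List.replicate M (0 : Int))).getD a [] = [] from
        List.getD_eq_default _ _ (by simpa using h)]
    simp

theorem pvGet2_init (h m j k : Int) (hj : 0 ≤ j) (hk : 0 ≤ k) :
    pvGet2 ((PySem.List.pyRange 0 (h + 1) 1).map (fun _ =>
      (PySem.List.pyRange 0 (m + 1) 1).map (fun _ => (0 : Int)))) j k = 0 := by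
  rw [pvGet2_eq _ j k hj hk, init_eq_repl]
  exact getD_repl_zero _ _ _ _


-- the three loops of port A, as named step functions (definitionally the port's lambdas)
def stepK (x : List Int) (i jj : Int) (dp : List (List Int)) (k : Int) : List (List Int) :=
  let xi := PySem.List.pyGetD x i 0
  if jj ≥ xi then pvSet2 dp jj k (PySem.Int.mod (pvGet2 dp jj k + pvGet2 dp (jj - xi) (k - 1)) pvMod) else dp

def stepJ (x : List Int) (m i : Int) (dp : List (List Int)) (jj : Int) : List (List Int) :=
  (PySem.List.pyRange 1 (m + 1) 1).foldl (stepK x i jj) dp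

def stepI (x : List Int) (h m : Int) (dp : List (List Int)) (i : Int) : List (List Int) :=
  (PySem.List.pyRange h 0 (-1)).foldl (stepJ x m i) dp

theorem pvmod_eq (a : Int) : PySem.Int.mod a pvMod = a % pvMod :=
  PySem.Int.mod_eq_emod_of_pos pvMod_pos

-- the value a full pass with element v assigns to each cell
def stepT (T : Int → Int → Int) (v a k : Int) : Int :=
  if 1 ≤ a ∧ v ≤ a ∧ 1 ≤ k then (T a k + T (a - v) (k - 1)) % pvMod else T a k

theorem kloop (x : List Int) (i H M v : Int) (hxv : PySem.List.pyGetD x i 0 = v)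
    (jj : Int) (hj1 : 1 ≤ jj) (hjH : jj ≤ H) (hv1 : 1 ≤ v) (hvj : v ≤ jj)
    (T : Int → Int → Int) :
    ∀ (n : Nat) (c : Int) (dp : List (List Int)), (M + 1 - c).toNat = n → 1 ≤ c →
    Shp dp H M →
    (∀ a b : Int, 0 ≤ a → a ≤ H → 0 ≤ b → b ≤ M →
       pvGet2 dp a b = if a = jj ∧ 1 ≤ b ∧ b < c then (T jj b + T (jj - v) (b - 1)) % pvMod else T a b) →
    Shp ((PySem.List.pyRange c (M + 1) 1).foldl (stepK x i jj) dp) H M ∧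
    (∀ a b : Int, 0 ≤ a → a ≤ H → 0 ≤ b → b ≤ M →
       pvGet2 ((PySem.List.pyRange c (M + 1) 1).foldl (stepK x i jj) dp) a b =
         if a = jj ∧ 1 ≤ b then (T jj b + T (jj - v) (b - 1)) % pvMod else T a b) := by
  intro n
  induction n with
  | zero =>
    intro c dp hfuel hc hshp htab
    rw [PySem.List.pyRange_one_eq_nil (by omega)]
    refine ⟨hshp, ?_⟩
    intro a b ha haH hb hbM
    rw [List.foldl_nil, htab a b ha haH hb hbM]
    by_cases hcond : a = jj ∧ 1 ≤ b
    · rw [if_pos ⟨hcond.1, hcond.2, by omega⟩, if_pos hcond]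
    · rw [if_neg (show ¬(a = jj ∧ 1 ≤ b ∧ b < c) by tauto), if_neg hcond]
  | succ n ih =>
    intro c dp hfuel hc hshp htab
    rw [PySem.List.pyRange_one_cons (by omega), List.foldl_cons]
    have hcM : c ≤ M := by omega
    have hnew : stepK x i jj dp c =
        pvSet2 dp jj c ((T jj c + T (jj - v) (c - 1)) % pvMod) := by
      unfold stepK
      simp only [hxv, pvmod_eq]
      rw [if_pos (by omega)]
      rw [htab jj c (by omega) hjH (by omega) hcM]
      rw [if_neg (by omega)]
      rw [htab (jj - v) (c - 1) (by omega) (by omega) (by omega) (by omega)]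
      rw [if_neg (by omega)]
    rw [hnew]
    have hshp' : Shp (pvSet2 dp jj c ((T jj c + T (jj - v) (c - 1)) % pvMod)) H M :=
      shp_set2 dp H M jj c _ hshp ⟨by omega, hjH⟩ ⟨by omega, hcM⟩
    refine ih (c + 1) _ (by omega) (by omega) hshp' ?_
    intro a b ha haH hb hbM
    rw [pvGet2_pvSet2 dp H M jj c _ a b hshp ⟨by omega, hjH⟩ ⟨by omega, hcM⟩ ⟨ha, haH⟩ ⟨hb, hbM⟩]
    by_cases h1 : a = jj ∧ b = c
    · rw [if_pos h1, if_pos ⟨h1.1, by omega, by omega⟩, h1.2]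
    · rw [if_neg h1, htab a b ha haH hb hbM]
      by_cases h2 : a = jj ∧ 1 ≤ b ∧ b < c
      · rw [if_pos h2, if_pos ⟨h2.1, h2.2.1, by omega⟩]
      · rw [if_neg h2, if_neg (show ¬(a = jj ∧ 1 ≤ b ∧ b < c + 1) from fun hc =>
          if hbc : b = c then h1 ⟨hc.1, hbc⟩ else h2 ⟨hc.1, hc.2.1, by omega⟩)]

theorem jloop (x : List Int) (i H M v : Int) (hxv : PySem.List.pyGetD x i 0 = v)
    (hv1 : 1 ≤ v) (hM : 1 ≤ M) (T : Int → Int → Int) :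
    ∀ (n : Nat) (b : Int) (dp : List (List Int)), b.toNat = n → 0 ≤ b → b ≤ H →
    Shp dp H M →
    (∀ a k : Int, 0 ≤ a → a ≤ H → 0 ≤ k → k ≤ M →
       pvGet2 dp a k = if b < a then stepT T v a k else T a k) →
    Shp ((PySem.List.pyRange b 0 (-1)).foldl (stepJ x M i) dp) H M ∧
    (∀ a k : Int, 0 ≤ a → a ≤ H → 0 ≤ k → k ≤ M →
       pvGet2 ((PySem.List.pyRange b 0 (-1)).foldl (stepJ x M i) dp) a k = stepT T v a k) := by
  intro n
  induction n with
  | zero =>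
    intro b dp hfuel hb0 hbH hshp htab
    have hb : b = 0 := by omega
    subst hb
    rw [PySem.List.pyRange_neg_one_eq_nil (by omega)]
    refine ⟨hshp, ?_⟩
    intro a k ha haH hk hkM
    rw [List.foldl_nil, htab a k ha haH hk hkM]
    by_cases h0 : 0 < a
    · rw [if_pos h0]
    · have ha0 : a = 0 := by omega
      rw [if_neg h0, ha0]
      unfold stepT
      rw [if_neg (by omega)]
  | succ n ih =>
    intro b dp hfuel hb0 hbH hshp htab
    have hb1 : 1 ≤ b := by omega
    rw [PySem.List.pyRange_neg_one_cons (by omega), List.foldl_cons]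
    by_cases hvb : v ≤ b
    · -- the k-pass really updates row b
      have hk := kloop x i H M v hxv b hb1 hbH hv1 hvb
        (fun a k => if b < a then stepT T v a k else T a k) (M + 1 - 1).toNat 1 dp
        (by omega) (by omega) hshp ?_
      · obtain ⟨hshp', htab'⟩ := hk
        refine ih (b - 1) _ (by omega) (by omega) (by omega) hshp' ?_
        intro a k ha haH hk hkM
        unfold stepJ
        rw [htab' a k ha haH hk hkM]
        simp only []
        by_cases h1 : a = b ∧ 1 ≤ k
        · rw [if_pos h1, h1.1]
          rw [if_neg (show ¬ b < b by omega), if_neg (show ¬ b < b - v by omega)]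
          rw [if_pos (show b - 1 < b by omega)]
          unfold stepT
          rw [if_pos ⟨hb1, hvb, h1.2⟩]
        · rw [if_neg h1]
          by_cases h2 : b < a
          · rw [if_pos h2, if_pos (show b - 1 < a by omega)]
          · rw [if_neg h2]
            by_cases h3 : b - 1 < a
            · have hab : a = b := by omega
              have hk0 : k = 0 := by
                rcases not_and_or.mp h1 with h | h
                · omega
                · omega
              rw [if_pos h3, hab, hk0]
              unfold stepT
              rw [if_neg (by omega)]
            · rw [if_neg h3]
      · intro a k ha haH hk hkM
        rw [htab a k ha haH hk hkM]
        rw [if_neg (show ¬(a = b ∧ 1 ≤ k ∧ k < 1) by omega)]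
    · -- v > b : every inner step is a no-op
      have hid : stepJ x M i dp b = dp := by
        unfold stepJ
        rw [PySem.List.foldl_congr_mem (PySem.List.pyRange 1 (M + 1) 1) (stepK x i b)
          (fun acc _ => acc) dp (fun acc y hy => by
            simp only [stepK, hxv]
            rw [if_neg (show ¬ b ≥ v by omega)])]
        rw [PySem.List.foldl_ignore]
      rw [hid]
      refine ih (b - 1) _ (by omega) (by omega) (by omega) hshp ?_
      intro a k ha haH hk hkM
      rw [htab a k ha haH hk hkM]
      by_cases h2 : b < a
      · rw [if_pos h2, if_pos (show b - 1 < a by omega)]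
      · rw [if_neg h2]
        by_cases h3 : b - 1 < a
        · have hab : a = b := by omega
          rw [if_pos h3, hab]
          unfold stepT
          rw [if_neg (show ¬(1 ≤ b ∧ v ≤ b ∧ 1 ≤ k) by omega)]
        · rw [if_neg h3]

theorem stepT_cnt (p : List Int) (hp : ∀ e ∈ p, 1 ≤ e) (v : Int) (hv : 1 ≤ v)
    (a k : Int) (ha : 0 ≤ a) (hk : 0 ≤ k) :
    stepT (cntF p) v a k = cntF (p ++ [v]) a k := by
  have hpv : ∀ e ∈ p ++ [v], 1 ≤ e := by
    intro e he
    rcases List.mem_append.mp he with h | h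
    · exact hp e h
    · simp at h; omega
  unfold stepT
  rw [cntF_append]
  by_cases h1 : 1 ≤ a ∧ v ≤ a ∧ 1 ≤ k
  · rw [if_pos h1]
  · rw [if_neg h1]
    by_cases hk0 : k = 0
    · subst hk0
      rw [cntF_kneg p (a - v) (0 - 1) (by omega), cntF_kzero]
      split <;> norm_num [pvMod]
    · have hk1 : 1 ≤ k := by omega
      by_cases ha0 : a = 0
      · subst ha0
        rw [cntF_jneg p hp (0 - v) (k - 1) (by omega), cntF_jzero p hp k hk1]
        norm_num [pvMod]
      · have hav : a - v < 0 := by omega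
        rw [cntF_jneg p hp (a - v) (k - 1) hav, add_zero, cntF_emod]

theorem seed (dp0 : List (List Int)) (x0 h m : Int) (hx0 : 1 ≤ x0) (hH : 1 ≤ h) (hM : 1 ≤ m)
    (hshp : Shp dp0 h m)
    (hz : ∀ a b : Int, 0 ≤ a → a ≤ h → 0 ≤ b → b ≤ m → pvGet2 dp0 a b = 0) :
    Shp (if x0 ≤ h then pvSet2 (pvSet2 dp0 0 0 1) x0 1 1 else pvSet2 dp0 0 0 1) h m ∧
    (∀ a b : Int, 0 ≤ a → a ≤ h → 0 ≤ b → b ≤ m →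
      pvGet2 (if x0 ≤ h then pvSet2 (pvSet2 dp0 0 0 1) x0 1 1 else pvSet2 dp0 0 0 1) a b =
        cntF [x0] a b) := by
  have hshp1 : Shp (pvSet2 dp0 0 0 1) h m :=
    shp_set2 dp0 h m 0 0 1 hshp ⟨le_refl 0, by omega⟩ ⟨le_refl 0, by omega⟩
  have htab1 : ∀ a b : Int, 0 ≤ a → a ≤ h → 0 ≤ b → b ≤ m →
      pvGet2 (pvSet2 dp0 0 0 1) a b = if a = 0 ∧ b = 0 then 1 else 0 := by
    intro a b ha hah hb hbm
    rw [pvGet2_pvSet2 dp0 h m 0 0 1 a b hshp ⟨le_refl 0, by omega⟩ ⟨le_refl 0, by omega⟩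
      ⟨ha, hah⟩ ⟨hb, hbm⟩]
    split
    · rfl
    · exact hz a b ha hah hb hbm
  by_cases hc : x0 ≤ h
  · rw [if_pos hc]
    have hshp2 : Shp (pvSet2 (pvSet2 dp0 0 0 1) x0 1 1) h m :=
      shp_set2 _ h m x0 1 1 hshp1 ⟨by omega, hc⟩ ⟨by omega, hM⟩
    refine ⟨hshp2, ?_⟩
    intro a b ha hah hb hbm
    rw [pvGet2_pvSet2 _ h m x0 1 1 a b hshp1 ⟨by omega, hc⟩ ⟨by omega, hM⟩ ⟨ha, hah⟩ ⟨hb, hbm⟩,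
       htab1 a b ha hah hb hbm]
    simp only [cntF]
    split_ifs
    all_goals first
    | omega
    | norm_num [pvMod]
  · rw [if_neg hc]
    refine ⟨hshp1, ?_⟩
    intro a b ha hah hb hbm
    rw [htab1 a b ha hah hb hbm]
    simp only [cntF]
    split_ifs
    all_goals first
    | omega
    | norm_num [pvMod]

theorem ifold (x : List Int) (H : Int) (hx : ∀ e ∈ x, 1 ≤ e) (hH : 1 ≤ H) :
    ∀ (n a : Nat) (dp : List (List Int)), x.length - a = n → 1 ≤ a → a ≤ x.length →
    Shp dp H (x.length : Int) →
    (∀ jj k : Int, 0 ≤ jj → jj ≤ H → 0 ≤ k → k ≤ (x.length : Int) →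
       pvGet2 dp jj k = cntF (x.take a) jj k) →
    Shp ((PySem.List.pyRange (a : Int) (x.length : Int) 1).foldl (stepI x H (x.length : Int)) dp) H (x.length : Int) ∧
    (∀ jj k : Int, 0 ≤ jj → jj ≤ H → 0 ≤ k → k ≤ (x.length : Int) →
       pvGet2 ((PySem.List.pyRange (a : Int) (x.length : Int) 1).foldl (stepI x H (x.length : Int)) dp) jj k =
         cntF x jj k) := by
  intro n
  induction n with
  | zero =>
    intro a dp hfuel ha1 halen hshp htab
    have ha : a = x.length := by omega
    rw [PySem.List.pyRange_one_eq_nil (by exact_mod_cast le_of_eq ha.symm)]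
    refine ⟨hshp, ?_⟩
    intro jj k hj hjH hk hkM
    rw [List.foldl_nil, htab jj k hj hjH hk hkM, ha, List.take_length]
  | succ n ih =>
    intro a dp hfuel ha1 halen hshp htab
    have halt : a < x.length := by omega
    have hcast : ((a : Int) < (x.length : Int)) := by exact_mod_cast halt
    rw [PySem.List.pyRange_one_cons hcast, List.foldl_cons]
    have hxv : PySem.List.pyGetD x (a : Int) 0 = x[a] := by
      rw [PySem.List.pyGetD_natCast, List.getD_eq_getElem x 0 halt]
    have hv1 : 1 ≤ x[a] := hx _ (List.getElem_mem halt)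
    have hM1 : (1 : Int) ≤ (x.length : Int) := by
      have : 1 ≤ x.length := by omega
      exact_mod_cast this
    have hxa : ∀ e ∈ x.take a, 1 ≤ e := fun e he => hx e (List.mem_of_mem_take he)
    have htk : x.take (a + 1) = x.take a ++ [x[a]] := by
      rw [List.take_add_one, List.getElem?_eq_getElem halt]
      rfl
    have hjl := jloop x (a : Int) H (x.length : Int) x[a] hxv hv1 hM1
      (cntF (x.take a)) H.toNat H dp rfl (by omega) (le_refl H) hshp ?_
    · obtain ⟨hshp', htab'⟩ := hjl
      have hca : ((a : Int) + 1) = (((a + 1 : Nat)) : Int) := by push_cast; ring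
      rw [hca]
      refine ih (a + 1) (stepI x H (x.length : Int) dp (a : Int)) (by omega) (by omega)
        (by omega) hshp' ?_
      intro jj k hj hjH hk hkM
      have : pvGet2 (stepI x H (x.length : Int) dp (a : Int)) jj k =
          stepT (cntF (x.take a)) x[a] jj k := htab' jj k hj hjH hk hkM
      rw [this, stepT_cnt (x.take a) hxa x[a] hv1 jj k hj hk, ← htk]
    · intro jj k hj hjH hk hkM
      rw [htab jj k hj hjH hk hkM, if_neg (show ¬ H < jj by omega)]


-- the intermediate states of port A, named for the proofs
def AINIT (x : List Int) (r s : Int) : List (List Int) :=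
  (PySem.List.pyRange 0 (PySem.Int.floordiv (r + s) 2 + 1) 1).map (fun _ =>
    (PySem.List.pyRange 0 ((x.length : Int) + 1) 1).map (fun _ => (0 : Int)))

def ASEED (x : List Int) (r s : Int) : List (List Int) :=
  if PySem.List.pyGetD x 0 0 ≤ PySem.Int.floordiv (r + s) 2 then
    pvSet2 (pvSet2 (AINIT x r s) 0 0 1) (PySem.List.pyGetD x 0 0) 1 1
  else pvSet2 (AINIT x r s) 0 0 1

def AFINAL (x : List Int) (r s : Int) : List (List Int) :=
  (PySem.List.pyRange 1 (x.length : Int) 1).foldl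
    (stepI x (PySem.Int.floordiv (r + s) 2) (x.length : Int)) (ASEED x r s)

theorem A_unfold (x : List Int) (r s : Int)
    (hg : ¬(r < s ∨ PySem.Int.mod (r + s) 2 = 1 ∨ r = 0)) :
    twoSubsequences x r s =
      (PySem.List.pyRange 1 ((x.length : Int) + 1) 1).foldl
        (fun res k => PySem.Int.mod (res +
          pvGet2 (AFINAL x r s) (PySem.Int.floordiv (r + s) 2) k *
          pvGet2 (AFINAL x r s) (PySem.Int.floordiv (r - s) 2) k) pvMod) 0 := by
  unfold twoSubsequences AFINAL ASEED AINIT stepI stepJ stepK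
  rw [if_neg hg]

theorem A_eval (x : List Int) (r s : Int)
    (hg : ¬(r < s ∨ PySem.Int.mod (r + s) 2 = 1 ∨ r = 0))
    (hx : x ≠ []) (hpos : ∀ e ∈ x, 1 ≤ e)
    (hH : 1 ≤ PySem.Int.floordiv (r + s) 2)
    (hl0 : 0 ≤ PySem.Int.floordiv (r - s) 2)
    (hlh : PySem.Int.floordiv (r - s) 2 ≤ PySem.Int.floordiv (r + s) 2) :
    twoSubsequences x r s =
      (PySem.List.pyRange 1 ((x.length : Int) + 1) 1).foldl
        (fun res k => PySem.Int.mod (res +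
          cntF x (PySem.Int.floordiv (r + s) 2) k *
          cntF x (PySem.Int.floordiv (r - s) 2) k) pvMod) 0 := by
  rw [A_unfold x r s hg]
  have hM1 : (1 : Int) ≤ (x.length : Int) := by
    have : 1 ≤ x.length := List.length_pos_iff.mpr hx
    exact_mod_cast this
  -- head element
  obtain ⟨x0, t, rfl⟩ : ∃ x0 t, x = x0 :: t := by
    cases x with
    | nil => exact absurd rfl hx
    | cons a t => exact ⟨a, t, rfl⟩
  have hx0get : PySem.List.pyGetD (x0 :: t) 0 0 = x0 := PySem.List.pyGetD_zero_cons x0 t 0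
  have hx01 : 1 ≤ x0 := hpos x0 (by simp)
  -- seed state
  have hseed := seed (AINIT (x0 :: t) r s) x0 (PySem.Int.floordiv (r + s) 2)
    ((x0 :: t).length : Int) hx01 hH hM1 (shp_init _ _)
    (fun a b ha _ hb _ => pvGet2_init _ _ a b ha hb)
  have hseed_eq : ASEED (x0 :: t) r s =
      (if x0 ≤ PySem.Int.floordiv (r + s) 2 then
        pvSet2 (pvSet2 (AINIT (x0 :: t) r s) 0 0 1) x0 1 1
      else pvSet2 (AINIT (x0 :: t) r s) 0 0 1) := by
    unfold ASEED
    rw [hx0get]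
  -- the outer loop, from index 1
  have htke : (x0 :: t).take 1 = [x0] := rfl
  have hif := ifold (x0 :: t) (PySem.Int.floordiv (r + s) 2) hpos hH
    ((x0 :: t).length - 1) 1 (ASEED (x0 :: t) r s) rfl (le_refl 1)
    (by simp) (by rw [hseed_eq]; exact hseed.1) ?_
  · obtain ⟨hshpF, htabF⟩ := hif
    have hone : (((1 : Nat) : Int)) = (1 : Int) := Nat.cast_one
    rw [hone] at htabF
    refine PySem.List.foldl_congr_mem _ _ _ 0 ?_
    intro acc k hk
    have hkb := (PySem.List.mem_pyRange_one).mp hk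
    have h1 : pvGet2 (AFINAL (x0 :: t) r s) (PySem.Int.floordiv (r + s) 2) k =
        cntF (x0 :: t) (PySem.Int.floordiv (r + s) 2) k := by
      unfold AFINAL
      exact htabF _ k (by omega) (le_refl _) (by omega) (by omega)
    have h2 : pvGet2 (AFINAL (x0 :: t) r s) (PySem.Int.floordiv (r - s) 2) k =
        cntF (x0 :: t) (PySem.Int.floordiv (r - s) 2) k := by
      unfold AFINAL
      exact htabF _ k hl0 hlh (by omega) (by omega)
    rw [h1, h2]
  · intro jj k hj hjH hk hkM
    rw [hseed_eq, htke]
    exact (hseed.2 jj k hj hjH hk hkM)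

-- ---------- B-side: the recursion equals cntF on positive elements ----------

theorem bF_eq_cntF (xs : List Int) (hxs : ∀ e ∈ xs, 1 ≤ e) (j k : Int) :
    bF xs j k = cntF xs j k := by
  induction xs generalizing j k with
  | nil =>
    simp only [bF, cntF]
    split_ifs <;> first | rfl | omega
  | cons v t ih =>
    have ht : ∀ e ∈ t, 1 ≤ e := fun e he => hxs e (by simp [he])
    by_cases hneg : j < 0 ∨ k < 0
    · rw [show bF (v :: t) j k = 0 by simp only [bF]; rw [if_pos hneg]]
      rcases hneg with h | h
      · exact (cntF_jneg (v :: t) hxs j k h).symm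
      · exact (cntF_kneg (v :: t) j k h).symm
    · simp only [bF, cntF]
      rw [if_neg hneg, pvmod_eq, ih ht j k, ih ht (j - v) (k - 1)]

theorem B_eval (x : List Int) (r s : Int)
    (hg : ¬(r < s ∨ PySem.Int.mod (r + s) 2 = 1 ∨ r = 0))
    (hpos : ∀ e ∈ x, 1 ≤ e) :
    twoSubsequences_alt x r s =
      (PySem.List.pyRange 1 ((x.length : Int) + 1) 1).foldl
        (fun res k => PySem.Int.mod (res +
          cntF x (PySem.Int.floordiv (r + s) 2) k *
          cntF x (PySem.Int.floordiv (r - s) 2) k) pvMod) 0 := by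
  unfold twoSubsequences_alt
  rw [if_neg hg]
  refine PySem.List.foldl_congr_mem _ _ _ 0 ?_
  intro acc k _
  rw [bF_eq_cntF x hpos, bF_eq_cntF x hpos]

-- ===== VERDICT (by name: the statement is the Claim_ definition above) =====
theorem twoSubsequences_spec : Claim_equal_twoSubsequences := by
  intro x r s hdom hpre
  unfold Spec_twoSubsequences
  by_cases hg : r < s ∨ PySem.Int.mod (r + s) 2 = 1 ∨ r = 0
  · unfold twoSubsequences twoSubsequences_alt
    rw [if_pos hg, if_pos hg]
  · obtain ⟨hx, hs, hpos⟩ : x ≠ [] ∧ 0 ≤ s ∧ ∀ e ∈ x, 1 ≤ e := hpre.resolve_left hg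
    have h2pos : (0 : Int) < 2 := by norm_num
    have hsr : s ≤ r := by
      by_contra hc
      exact hg (Or.inl (by omega))
    have hr0 : r ≠ 0 := fun hc => hg (Or.inr (Or.inr hc))
    have hm1 : PySem.Int.mod (r + s) 2 ≠ 1 := fun hc => hg (Or.inr (Or.inl hc))
    have hm0 : PySem.Int.mod (r + s) 2 = 0 := by
      have ha := PySem.Int.mod_nonneg (r + s) h2pos
      have hb := PySem.Int.mod_lt (r + s) h2pos
      omega
    have hdvd : (2 : Int) ∣ (r + s) := (PySem.Int.mod_eq_zero_iff_dvd _ _).mp hm0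
    have hH : 1 ≤ PySem.Int.floordiv (r + s) 2 := by
      rw [PySem.Int.le_floordiv_iff_mul_le h2pos]
      omega
    have hl0 : 0 ≤ PySem.Int.floordiv (r - s) 2 := by
      rw [PySem.Int.le_floordiv_iff_mul_le h2pos]
      omega
    have hlh : PySem.Int.floordiv (r - s) 2 ≤ PySem.Int.floordiv (r + s) 2 := by
      rw [PySem.Int.floordiv_eq_ediv_of_pos h2pos, PySem.Int.floordiv_eq_ediv_of_pos h2pos]
      exact Int.ediv_le_ediv h2pos (by omega)
    rw [A_eval x r s hg hx hpos hH hl0 hlh, B_eval x r s hg hpos]
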